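-- pv_equiv track=rewrite | github.com/soychun/Algorithm | BaekJoon_study/sw역량테스트/이차원배열과연산_1.py | sort_r
-- ===== SOURCE A (Python) =====
-- def sort_r(a):
--     remove_set = {0}
--     a =[i for i in a if i not in remove_set]
--     num_tmp = list(set(a))
--     bag = []
--     for i in range(len(num_tmp)):
--         bag.append((num_tmp[i], a.count(num_tmp[i])))
--     bag = sorted(bag, key=lambda x: (x[1], x[0]))
--     sorted_a = []
--     for i in range(len(bag)):
--         sorted_a.append(bag[i][0])
--         sorted_a.append(bag[i][1])
--     return sorted_a
-- ===== SOURCE B (Python) =====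
-- def _runs(s):
--     # s is sorted: scan it once with two pointers, emitting one
--     # (value, run-length) pair per maximal run of equal values
--     out = []
--     i = 0
--     n = len(s)
--     while i < n:
--         j = i + 1
--         while j < n and s[j] == s[i]:
--             j += 1
--         out.append((s[i], j - i))
--         i = j
--     return out
--
--
-- def sort_r(a):
--     s = sorted(x for x in a if x != 0)
--     pairs = sorted(_runs(s), key=lambda p: (p[1], p[0]))
--     out = []
--     for v, c in pairs:
--         out.append(v)
--         out.append(c)
--     return out
-- ===== Notes on version B (the rewrite author's own statement) =====
-- stated objective: faster
-- what changed: B sorts the non-zero values once and extracts (value, run-length) pairs in a single two-pointer run-scan over the sorted list, instead of A's set of distinct values with a full a.count scan per distinct value; the pairs are then sorted by (count, value) and flattened.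
import Mathlib
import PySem

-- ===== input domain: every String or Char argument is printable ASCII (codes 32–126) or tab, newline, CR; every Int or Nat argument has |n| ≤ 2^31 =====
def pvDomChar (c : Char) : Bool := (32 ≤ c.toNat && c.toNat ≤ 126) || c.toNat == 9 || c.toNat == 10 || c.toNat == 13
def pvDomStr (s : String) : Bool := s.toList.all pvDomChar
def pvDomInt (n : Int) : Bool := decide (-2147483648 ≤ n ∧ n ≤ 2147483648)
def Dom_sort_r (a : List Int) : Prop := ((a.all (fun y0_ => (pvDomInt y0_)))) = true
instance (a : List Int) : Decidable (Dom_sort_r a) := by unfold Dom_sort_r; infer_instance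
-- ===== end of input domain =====

-- B sorts the non-zero values once and extracts (value, run-length) pairs in one recursive
-- run-scan over the sorted list, instead of A's distinct-set plus one full a.count scan per
-- distinct value; the pairs are sorted by (count, value) and flattened (objective: faster).
-- Note: Python's list(set(a)) iteration order is not modelled; it is irrelevant here because
-- the bag is immediately sorted by the injective key (count, value).

-- ===== PORT A =====
def sort_r (a : List Int) : List Int :=
  -- remove_set = {0}; a = [i for i in a if i not in remove_set]
  let removeSet : PySem.Set Int := PySem.Set.ofList [0]
  let a' : List Int := a.filter (fun i => !(PySem.Set.contains removeSet i))
  -- num_tmp = list(set(a))  (set order consumed only through the injective-key sort below)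
  let numTmp : List Int := PySem.Set.ofList a'
  -- for i in range(len(num_tmp)): bag.append((num_tmp[i], a.count(num_tmp[i])))
  let bag : List (Int × Int) :=
    (PySem.List.pyRange 0 (numTmp.length : Int)).foldl
      (fun bag i =>
        bag ++ [(PySem.List.pyGetD numTmp i 0,
                 (PySem.List.count a' (PySem.List.pyGetD numTmp i 0) : Int))]) []
  -- bag = sorted(bag, key=lambda x: (x[1], x[0]))
  let bag2 := PySem.List.sorted2 bag (fun x => x.2) (fun x => x.1)
  -- for i in range(len(bag)): sorted_a.append(bag[i][0]); sorted_a.append(bag[i][1])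
  (PySem.List.pyRange 0 (bag2.length : Int)).foldl
    (fun acc i =>
      acc ++ [(PySem.List.pyGetD bag2 i (0, 0)).1] ++ [(PySem.List.pyGetD bag2 i (0, 0)).2]) []

-- ===== PORT B =====
-- _runs(s): two-pointer scan of the sorted list. The outer while-loop advances i to j, i.e.
-- recurses on the remaining suffix of s; the inner loop 'j = i+1; while j < n and s[j] == s[i]:
-- j += 1' finds the end of the current run: j - i = 1 + length of the maximal prefix of the
-- tail equal to s[i] (takeWhile), and the suffix from j on is the corresponding dropWhile.
-- This is exact: both sides emit (s[i], j - i) per maximal run, in order.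
def runsB : List Int → List (Int × Int)
  | [] => []
  | v :: rest₀ =>
      let run : Int := 1 + ((rest₀.takeWhile (fun y => y == v)).length : Int)
      let rest := rest₀.dropWhile (fun y => y == v)
      [(v, run)] ++ runsB rest
  termination_by s => s.length
  decreasing_by
    simp only [List.length_cons]
    exact Nat.lt_succ_of_le (List.dropWhile_sublist _).length_le

def sort_r_alt (a : List Int) : List Int :=
  -- s = sorted(x for x in a if x != 0)
  let s := PySem.List.sorted (a.filter (fun x => x != 0)) (fun x => x)
  -- pairs = sorted(_runs(s), key=lambda p: (p[1], p[0]))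
  let pairs := PySem.List.sorted2 (runsB s) (fun p => p.2) (fun p => p.1)
  -- out = []; for v, c in pairs: out.append(v); out.append(c)
  pairs.foldl (fun out p => out ++ [p.1] ++ [p.2]) []

-- ===== PRECONDITION & SPEC =====
def Spec_sort_r (a : List Int) (out : List Int) : Prop := out = sort_r_alt a
instance (a : List Int) (out : List Int) : Decidable (Spec_sort_r a out) := by unfold Spec_sort_r; infer_instance

-- ===== CLAIM (what is proved, stated in full; the proofs are below) =====
def Claim_equal_sort_r : Prop := ∀ (a : List Int), Dom_sort_r a → Spec_sort_r a (sort_r a)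

-- ===== LEMMAS AND PROOFS =====

-- A's remove_set filter and B's generator filter keep exactly the non-zero elements.
lemma filterA_eq (a : List Int) :
    a.filter (fun i => !(PySem.Set.contains (PySem.Set.ofList [0]) i))
      = a.filter (fun x => x != 0) := by
  apply List.filter_congr
  intro x _
  by_cases h : x = 0 <;> simp [h, PySem.Set.contains, PySem.Set.ofList, PySem.Set.add]

-- A's index loop builds the bag as a map over the distinct values.
lemma bagA_eq (a' numTmp : List Int) :
    (PySem.List.pyRange 0 (numTmp.length : Int)).foldl
      (fun bag i =>
        bag ++ [(PySem.List.pyGetD numTmp i 0,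
                 (PySem.List.count a' (PySem.List.pyGetD numTmp i 0) : Int))]) []
      = numTmp.map (fun v => (v, (List.count v a' : Int))) := by
  have h := PySem.List.foldl_pyRange_pyGetD' numTmp 0
      (fun bag v => bag ++ [(v, (PySem.List.count a' v : Int))]) [] (le_refl 0)
  have h2 := PySem.List.foldl_append_singleton_eq_map
      (fun v => (v, (PySem.List.count a' v : Int))) numTmp []
  refine h.trans ?_
  simp only [Int.toNat_zero, List.drop_zero]
  exact h2.trans (by simp [PySem.List.count_eq])

-- A's final index loop is B's flatten fold.
lemma flattenA_eq (bag2 : List (Int × Int)) :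
    (PySem.List.pyRange 0 (bag2.length : Int)).foldl
      (fun acc i =>
        acc ++ [(PySem.List.pyGetD bag2 i (0, 0)).1] ++ [(PySem.List.pyGetD bag2 i (0, 0)).2]) []
      = bag2.foldl (fun out p => out ++ [p.1] ++ [p.2]) [] := by
  have h := PySem.List.foldl_pyRange_pyGetD' bag2 ((0 : Int), (0 : Int))
      (fun acc p => acc ++ [p.1] ++ [p.2]) [] (le_refl 0)
  refine h.trans ?_
  simp only [Int.toNat_zero, List.drop_zero]

-- sorted2 with keys (snd, fst) is sorted with the injective lexicographic key.
lemma sorted2_eq_sorted_lex (xs : List (Int × Int)) :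
    PySem.List.sorted2 xs (fun p => p.2) (fun p => p.1)
      = PySem.List.sorted xs (fun p => toLex (p.2, p.1)) := by
  have hfun : (fun (a b : Int × Int) => decide (a.2 < b.2) || (!decide (b.2 < a.2) && decide (a.1 < b.1)))
      = fun (a b : Int × Int) => decide (toLex (a.2, a.1) < toLex (b.2, b.1)) := by
    funext p q
    by_cases h1 : p.2 < q.2 <;> by_cases h2 : q.2 < p.2 <;> by_cases h3 : p.1 < q.1 <;>
      simp [Prod.Lex.lt_iff, h1, h2, h3] <;> omega
  simp only [PySem.List.sorted2, PySem.List.sorted, Bool.false_eq_true, if_false, hfun]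

-- the lex key p ↦ (p.2, p.1) is injective
lemma lexKey_injective : Function.Injective (fun p : Int × Int => toLex (p.2, p.1)) := by
  intro p q h
  have h' : (p.2, p.1) = (q.2, q.1) := toLex.injective h
  have h1 := congrArg Prod.fst h'
  have h2 := congrArg Prod.snd h'
  exact Prod.ext h2 h1

-- run-scan of a sorted list: every produced pair is (v, count of v), the firsts are exactly
-- the distinct values of s, without duplicates
lemma mem_map_fst_runsB (s : List Int) (x : Int) :
    x ∈ (runsB s).map Prod.fst ↔ x ∈ s := by
  induction s using runsB.induct with
  | case1 => simp [runsB]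
  | case2 v rest₀ rest ih =>
      rw [runsB]
      simp only [List.map_append, List.map_cons, List.map_nil, List.mem_append,
        List.mem_cons, List.not_mem_nil, or_false]
      rw [ih]
      constructor
      · rintro (rfl | hx)
        · exact .inl rfl
        · exact .inr ((List.dropWhile_sublist _).mem hx)
      · rintro (rfl | hx)
        · exact .inl rfl
        · conv at hx => rw [← List.takeWhile_append_dropWhile (p := fun y => y == v) (l := rest₀)]
          rcases List.mem_append.1 hx with h | h
          · exact .inl (by simpa using List.mem_takeWhile_imp h)
          · exact .inr h

lemma sorted_tail_not_mem (v : Int) (rest₀ : List Int)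
    (hs : (v :: rest₀).Pairwise (· ≤ ·)) :
    v ∉ rest₀.dropWhile (fun y => y == v) := by
  intro hv
  have hsub : (rest₀.dropWhile (fun y => y == v)).Sublist rest₀ := List.dropWhile_sublist _
  -- the first element of the dropWhile is ≠ v and ≤ every later element
  cases hrest : rest₀.dropWhile (fun y => y == v) with
  | nil => simp [hrest] at hv
  | cons h t =>
      have hne : ¬ (h == v) = true := by
        have := List.head?_dropWhile_not (p := fun y => y == v) (l := rest₀)
        rw [hrest] at this
        simpa using this
      have hhv : h ≠ v := by simpa using hne
      -- v ≤ h from pairwise on v :: rest₀ (h ∈ rest₀)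
      have hmem : h ∈ rest₀ := hsub.mem (hrest ▸ List.mem_cons_self ..)
      have hvh : v ≤ h := (List.pairwise_cons.1 hs).1 h hmem
      have hlt : v < h := lt_of_le_of_ne hvh (Ne.symm hhv)
      -- pairwise on the dropWhile: h ≤ every element of t
      have hp : (h :: t).Pairwise (· ≤ ·) :=
        hrest ▸ ((List.pairwise_cons.1 hs).2.sublist hsub)
      rw [hrest] at hv
      rcases List.mem_cons.1 hv with rfl | hv
      · exact absurd rfl hhv
      · have : h ≤ v := (List.pairwise_cons.1 hp).1 v hv
        omega

lemma runsB_pairs (s : List Int) (hs : s.Pairwise (· ≤ ·)) :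
    ((runsB s).map Prod.fst).Nodup ∧
    runsB s = ((runsB s).map Prod.fst).map (fun v => (v, (s.count v : Int))) := by
  induction s using runsB.induct with
  | case1 => simp [runsB]
  | case2 v rest₀ rest ih =>
      have hsplit : rest₀ = rest₀.takeWhile (fun y => y == v) ++ rest₀.dropWhile (fun y => y == v) :=
        (List.takeWhile_append_dropWhile).symm
      have htail : (rest₀.dropWhile (fun y => y == v)).Pairwise (· ≤ ·) :=
        (List.pairwise_cons.1 hs).2.sublist (List.dropWhile_sublist _)
      obtain ⟨ihn, ihe⟩ := ih htail
      have hvnot : v ∉ rest₀.dropWhile (fun y => y == v) := sorted_tail_not_mem v rest₀ hs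
      -- each element of the takeWhile equals v
      have htake : ∀ x ∈ rest₀.takeWhile (fun y => y == v), x = v := by
        intro x hx
        simpa using List.mem_takeWhile_imp hx
      -- count facts
      have hcount_take : (rest₀.takeWhile (fun y => y == v)).count v
          = (rest₀.takeWhile (fun y => y == v)).length := by
        rw [List.count_eq_length]
        intro x hx
        simp [htake x hx]
      have hcv : ((v :: rest₀).count v : Int)
          = 1 + ((rest₀.takeWhile (fun y => y == v)).length : Int) := by
        rw [List.count_cons_self]
        conv_lhs => rw [hsplit]
        rw [List.count_append, hcount_take, List.count_eq_zero.2 hvnot]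
        push_cast; ring
      -- counts of elements of the remainder are unchanged
      have hcrest : ∀ x ∈ rest₀.dropWhile (fun y => y == v),
          (v :: rest₀).count x = (rest₀.dropWhile (fun y => y == v)).count x := by
        intro x hx
        have hxv : x ≠ v := fun h => hvnot (h ▸ hx)
        rw [List.count_cons_of_ne (Ne.symm hxv)]
        conv_lhs => rw [hsplit]
        rw [List.count_append, List.count_eq_zero.2 (fun hmem => hxv (htake x hmem))]
        omega
      rw [runsB]
      simp only [List.map_append, List.map_cons, List.map_nil]
      constructor
      · refine List.Nodup.append (by simp) ihn ?_
        intro x hx hy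
        have hxv : x = v := by simpa using hx
        subst hxv
        exact hvnot ((mem_map_fst_runsB _ _).1 hy)
      · simp only [List.singleton_append]
        congr 1
        · exact congrArg (Prod.mk v) (by rw [hcv])
        · conv_lhs => rw [ihe]
          apply List.map_congr_left
          intro w hw
          have hws : w ∈ rest₀.dropWhile (fun y => y == v) :=
            (mem_map_fst_runsB _ w).1 hw
          rw [hcrest w hws]

-- the firsts of runsB (sorted nz) are a permutation of set(nz)
lemma runsB_perm_bag (nz : List Int) :
    (runsB (PySem.List.sorted nz (fun x => x))).Perm
      ((PySem.Set.ofList nz).map (fun v => (v, (List.count v nz : Int)))) := by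
  set s := PySem.List.sorted nz (fun x => x) with hsdef
  have hsp : s.Pairwise (· ≤ ·) := by
    have := PySem.List.sorted_pairwise nz (fun x => x)
    simpa [hsdef] using this
  have hperm : s.Perm nz := PySem.List.sorted_perm nz (fun x => x) false
  obtain ⟨hn, he⟩ := runsB_pairs s hsp
  -- firsts of runsB s ~ Set.ofList nz : nodup lists with the same members
  have hfstperm : ((runsB s).map Prod.fst).Perm (PySem.Set.ofList nz) := by
    rw [List.perm_ext_iff_of_nodup hn (PySem.Set.nodup_ofList nz)]
    intro x
    rw [mem_map_fst_runsB]
    constructor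
    · intro hx
      have : x ∈ nz := hperm.mem_iff.1 hx
      simpa [PySem.List.mem_dedup] using this
    · intro hx
      exact hperm.mem_iff.2 (by simpa [PySem.List.mem_dedup] using hx)
  have hcount : ∀ x, s.count x = nz.count x := fun x => hperm.count_eq x
  rw [he]
  have : ((runsB s).map Prod.fst).map (fun v => (v, (s.count v : Int)))
      = ((runsB s).map Prod.fst).map (fun v => (v, (nz.count v : Int))) := by
    apply List.map_congr_left; intro x _; rw [hcount]
  rw [this]
  exact hfstperm.map _

lemma sort_r_eq (a : List Int) : sort_r a = sort_r_alt a := by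
  simp only [sort_r, sort_r_alt]
  rw [filterA_eq, bagA_eq, flattenA_eq]
  set nz := a.filter (fun x => x != 0) with hnz
  congr 1
  rw [sorted2_eq_sorted_lex, sorted2_eq_sorted_lex]
  exact (PySem.List.sorted_eq_sorted_of_perm _ _ _ lexKey_injective
    (runsB_perm_bag nz)).symm

-- ===== VERDICT (by name: the statement is the Claim_ definition above) =====
theorem sort_r_spec : Claim_equal_sort_r := by
  intro a _
  unfold Spec_sort_r
  exact sort_r_eq a
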